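-- pv_equiv track=rewrite | github.com/richfrem/Project_Sanctuary | capture_glyph_code_snapshot.py | extract_core_essence
-- ===== SOURCE A (Python) =====
-- def extract_core_essence(full_content):
--     """Extract only core essence files from full content"""
--     lines = full_content.split('\n')
--     core_lines = []
--     in_core_file = False
--
--     core_files = [
--         'The_Garden_and_The_Cage.md',
--         'README.md',
--         '01_PROTOCOLS/00_Prometheus_Protocol.md',
--         '01_PROTOCOLS/27_The_Doctrine_of_Flawed_Winning_Grace_v1.2.md',
--         'chrysalis_core_essence.md',
--         'Socratic_Key_User_Guide.md'
--     ]
--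
--     for line in lines:
--         if line.startswith('--- START OF FILE: '):
--             filename = line.replace('--- START OF FILE: ', '').replace(' ---', '')
--             in_core_file = any(core_file in filename for core_file in core_files)
--
--         if in_core_file:
--             core_lines.append(line)
--
--     return '\n'.join(core_lines)
-- ===== SOURCE B (Python) =====
-- CORE_FILES = [
--     'The_Garden_and_The_Cage.md',
--     'README.md',
--     '01_PROTOCOLS/00_Prometheus_Protocol.md',
--     '01_PROTOCOLS/27_The_Doctrine_of_Flawed_Winning_Grace_v1.2.md',
--     'chrysalis_core_essence.md',
--     'Socratic_Key_User_Guide.md'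
-- ]
--
-- HEADER = '--- START OF FILE: '
--
--
-- def _is_core_header(header_line):
--     filename = header_line.replace(HEADER, '').replace(' ---', '')
--     return any(core_file in filename for core_file in CORE_FILES)
--
--
-- def extract_core_essence(full_content):
--     """Extract only core essence files from full content (two-phase block filter)"""
--     # Phase 1: partition lines into blocks, one per header; drop pre-header lines.
--     blocks = []
--     for line in full_content.split('\n'):
--         if line.startswith(HEADER):
--             blocks.append([line])
--         elif blocks:
--             blocks[-1].append(line)
--     # Phase 2: keep whole blocks whose header names a core file.
--     return '\n'.join(line for block in blocks if _is_core_header(block[0]) for line in block)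
-- ===== Notes on version B (the rewrite author's own statement) =====
-- stated objective: alternative
-- what changed: Replaces the single-pass boolean state machine with a two-phase block algorithm: first partition the lines into header-led blocks, then filter whole blocks by their header filename and join.
import Mathlib
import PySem

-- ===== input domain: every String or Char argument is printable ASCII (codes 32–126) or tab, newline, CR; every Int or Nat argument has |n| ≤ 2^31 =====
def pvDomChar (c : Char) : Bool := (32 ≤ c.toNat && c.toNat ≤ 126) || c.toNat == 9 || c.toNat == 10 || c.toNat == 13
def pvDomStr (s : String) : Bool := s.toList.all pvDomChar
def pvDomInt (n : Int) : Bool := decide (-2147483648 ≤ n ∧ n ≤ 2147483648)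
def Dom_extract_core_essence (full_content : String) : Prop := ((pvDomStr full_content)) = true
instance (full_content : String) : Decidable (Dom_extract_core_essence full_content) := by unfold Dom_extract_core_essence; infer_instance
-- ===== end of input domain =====

-- B is an alternative two-phase block algorithm (partition into header-led blocks, then filter whole blocks); same cost as A.

-- shared leaf helpers (both Pythons contain these identical expressions)
def coreFiles : List String :=
  ["The_Garden_and_The_Cage.md",
   "README.md",
   "01_PROTOCOLS/00_Prometheus_Protocol.md",
   "01_PROTOCOLS/27_The_Doctrine_of_Flawed_Winning_Grace_v1.2.md",
   "chrysalis_core_essence.md",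
   "Socratic_Key_User_Guide.md"]

def isHdr (line : String) : Bool := PySem.Str.startswith line "--- START OF FILE: "

def isCoreHdr (line : String) : Bool :=
  let filename := PySem.Str.replace (PySem.Str.replace line "--- START OF FILE: " "") " ---" ""
  coreFiles.any (fun core_file => PySem.Str.isIn core_file filename)

-- ===== PORT A =====
-- A's loop body: one boolean state machine step
def stepA (st : Bool × List String) (line : String) : Bool × List String :=
  let in_core := if isHdr line then isCoreHdr line else st.1
  (in_core, if in_core then st.2 ++ [line] else st.2)

def extract_core_essence (full_content : String) : String :=
  let lines := (PySem.Str.split? full_content "\n").getD []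
  let st := lines.foldl stepA (false, [])
  PySem.Str.join "\n" st.2

-- ===== PORT B =====
-- phase 1 step: open a new block on a header line, else append to the last block (drop pre-header lines)
def stepB (blocks : List (List String)) (line : String) : List (List String) :=
  if isHdr line then blocks ++ [[line]]
  else if blocks.isEmpty then blocks
  else blocks.dropLast ++ [blocks.getLastD [] ++ [line]]

def extract_core_essence_alt (full_content : String) : String :=
  let blocks := ((PySem.Str.split? full_content "\n").getD []).foldl stepB []
  let kept := blocks.filter (fun b => isCoreHdr (b.headD ""))
  PySem.Str.join "\n" kept.flatten

-- ===== PRECONDITION & SPEC =====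
def Spec_extract_core_essence (full_content : String) (out : String) : Prop := out = extract_core_essence_alt full_content
instance (full_content : String) (out : String) : Decidable (Spec_extract_core_essence full_content out) := by unfold Spec_extract_core_essence; infer_instance

-- ===== CLAIM (what is proved, stated in full; the proofs are below) =====
def Claim_equal_extract_core_essence : Prop := ∀ (full_content : String), Dom_extract_core_essence full_content → Spec_extract_core_essence full_content (extract_core_essence full_content)

-- ===== LEMMAS AND PROOFS =====

-- the abstraction functions from B's block state to A's (flag, accumulator) state
def keepB (b : List String) : Bool := isCoreHdr (b.headD "")

def incOf (blocks : List (List String)) : Bool :=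
  match blocks.getLast? with
  | none => false
  | some b => keepB b

def flatKept (blocks : List (List String)) : List String :=
  (blocks.filter keepB).flatten

lemma stepB_nonempty (blocks : List (List String)) (line : String)
    (h : ∀ b ∈ blocks, b ≠ []) : ∀ b ∈ stepB blocks line, b ≠ [] := by
  intro b hb
  unfold stepB at hb
  split_ifs at hb with h1 h2
  · rcases List.mem_append.1 hb with h' | h'
    · exact h b h'
    · simp at h'; simp [h']
  · exact h b hb
  · rcases List.mem_append.1 hb with h' | h'
    · exact h b (List.dropLast_subset _ h')
    · simp at h'; simp [h']

lemma step_sim (blocks : List (List String)) (line : String)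
    (h : ∀ b ∈ blocks, b ≠ []) :
    stepA (incOf blocks, flatKept blocks) line =
      (incOf (stepB blocks line), flatKept (stepB blocks line)) := by
  by_cases hH : isHdr line
  · -- header line: a new block is opened; A recomputes the flag
    have hB : stepB blocks line = blocks ++ [[line]] := by simp [stepB, hH]
    have hlast : incOf (blocks ++ [[line]]) = keepB [line] := by
      simp [incOf]
    have hflat : flatKept (blocks ++ [[line]]) =
        flatKept blocks ++ (if keepB [line] then [line] else []) := by
      simp only [flatKept, List.filter_append, List.flatten_append]
      by_cases hk : keepB [line] <;> simp [hk]
    have hk1 : keepB [line] = isCoreHdr line := by simp [keepB]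
    rw [hB, hlast, hflat, hk1]
    simp only [stepA, hH, if_true]
    by_cases hk : isCoreHdr line <;> simp [hk]
  · -- non-header line
    cases hbl : blocks with
    | nil =>
        have : stepB [] line = [] := by simp [stepB, hH]
        simp [stepA, hH, this, incOf, flatKept]
    | cons b0 bs =>
        have hne : blocks ≠ [] := by simp [hbl]
        rw [← hbl]
        have hLgl : (blocks.getLast?.getD []) = blocks.getLast hne := by
          rw [List.getLast?_eq_some_getLast hne]; rfl
        obtain ⟨x, xs, hxl⟩ : ∃ x xs, (blocks.getLast?.getD []) = x :: xs := by
          have hmem := h (blocks.getLast hne) (List.getLast_mem hne)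
          rw [hLgl]
          cases hc : blocks.getLast hne with
          | nil => exact absurd hc hmem
          | cons y ys => exact ⟨y, ys, rfl⟩
        have hB : stepB blocks line =
            blocks.dropLast ++ [(blocks.getLast?.getD []) ++ [line]] := by
          simp [stepB, hH, List.isEmpty_iff, hne]
        have hdecomp : blocks.dropLast ++ [(blocks.getLast?.getD [])] = blocks := by
          rw [hLgl]; exact List.dropLast_concat_getLast hne
        have hkeep : keepB ((blocks.getLast?.getD []) ++ [line]) = keepB ((blocks.getLast?.getD [])) := by
          rw [hxl]; simp [keepB]
        have hinc : incOf blocks = keepB ((blocks.getLast?.getD [])) := by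
          simp only [incOf, List.getLast?_eq_some_getLast hne, Option.getD_some]
        have hincB : incOf (stepB blocks line) = keepB ((blocks.getLast?.getD [])) := by
          rw [hB]; simp only [incOf, List.getLast?_concat]; exact hkeep
        have hflatA : flatKept blocks =
            (blocks.dropLast.filter keepB).flatten ++
              (if keepB ((blocks.getLast?.getD [])) then (blocks.getLast?.getD []) else []) := by
          conv_lhs => rw [flatKept, ← hdecomp]
          rw [List.filter_append, List.flatten_append]
          by_cases hk : keepB ((blocks.getLast?.getD [])) <;> simp [hk]
        have hflatB : flatKept (stepB blocks line) =
            flatKept blocks ++ (if keepB ((blocks.getLast?.getD [])) then [line] else []) := by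
          rw [hB, flatKept, List.filter_append, List.flatten_append, hflatA]
          by_cases hk : keepB ((blocks.getLast?.getD [])) <;> simp [hk, hkeep]
        rw [hincB, hflatB, ← hinc]
        simp only [stepA, hH, if_false, Bool.false_eq_true]
        by_cases hk : incOf blocks <;> simp [hk]

lemma fold_sim (lines : List String) :
    ∀ (blocks : List (List String)), (∀ b ∈ blocks, b ≠ []) →
      lines.foldl stepA (incOf blocks, flatKept blocks) =
        (incOf (lines.foldl stepB blocks), flatKept (lines.foldl stepB blocks)) := by
  induction lines with
  | nil => intro blocks _; simp
  | cons l rest ih =>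
      intro blocks h
      simp only [List.foldl_cons]
      rw [step_sim blocks l h]
      exact ih (stepB blocks l) (stepB_nonempty blocks l h)

-- ===== VERDICT (by name: the statement is the Claim_ definition above) =====
theorem extract_core_essence_spec : Claim_equal_extract_core_essence := by
  intro full_content _
  unfold Spec_extract_core_essence
  simp only [extract_core_essence, extract_core_essence_alt]
  rw [show (false, ([] : List String)) = (incOf ([] : List (List String)), flatKept []) from by
    simp [incOf, flatKept]]
  rw [fold_sim _ [] (by simp)]
  rfl
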